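-- pv_equiv track=rewrite | github.com/lixoisnip/Ppkp | scripts/firmware_module_architecture_analyzer.py | merge_conf
-- ===== SOURCE A (Python) =====
-- from typing import Iterable
--
-- def merge_conf(values: Iterable[str]) -> str:
--     rank = {"unknown": 0, "hypothesis": 1, "probable": 2, "confirmed": 3}
--     best = "unknown"
--     for v in values:
--         low = (v or "").strip().lower()
--         low = "probable" if low == "medium" else low
--         low = "confirmed" if low in {"high", "strong", "pass"} else low
--         low = low if low in rank else "hypothesis"
--         if rank[low] > rank[best]:
--             best = low
--     return best
-- ===== SOURCE B (Python) =====
-- def merge_conf(values):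
--     toks = [(v or "").strip().lower() for v in values]
--     if any(t in ("confirmed", "high", "strong", "pass") for t in toks):
--         return "confirmed"
--     if any(t in ("probable", "medium") for t in toks):
--         return "probable"
--     if any(t != "unknown" for t in toks):
--         return "hypothesis"
--     return "unknown"
-- ===== Notes on version B (the rewrite author's own statement) =====
-- stated objective: alternative
-- what changed: B drops the rank table and running-max loop entirely: it normalizes all values in one pass, then decides by staged short-circuit membership tests in priority order (any confirmed-class token -> 'confirmed', else any probable-class -> 'probable', else any non-'unknown' token -> 'hypothesis', else 'unknown').
import Mathlib
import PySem

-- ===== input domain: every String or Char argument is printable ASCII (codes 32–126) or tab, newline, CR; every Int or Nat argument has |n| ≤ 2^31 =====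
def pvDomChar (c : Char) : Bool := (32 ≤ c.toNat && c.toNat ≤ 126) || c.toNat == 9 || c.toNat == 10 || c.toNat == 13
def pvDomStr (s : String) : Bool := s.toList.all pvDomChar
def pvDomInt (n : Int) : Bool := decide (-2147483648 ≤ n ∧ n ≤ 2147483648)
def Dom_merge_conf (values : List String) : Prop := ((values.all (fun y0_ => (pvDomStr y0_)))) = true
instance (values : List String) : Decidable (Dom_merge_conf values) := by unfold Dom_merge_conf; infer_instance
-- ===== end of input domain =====

-- B drops A's rank table and running-max loop: it normalizes all values once, then
-- decides by staged short-circuit membership tests in priority order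
-- (objective: alternative decomposition, same cost).

/-- `(v or "").strip().lower()` — the normalization both Pythons apply verbatim. -/
def mcNorm (v : String) : String :=
  PySem.Str.lower (PySem.Str.strip (if v == "" then "" else v))

-- ===== PORT A =====
def mcRank : PySem.Dict String Int :=
  PySem.Dict.ofList [("unknown", 0), ("hypothesis", 1), ("probable", 2), ("confirmed", 3)]

-- rank[low]/rank[best]: both keys are provably members of `rank` (the previous line
-- forces low into it; best starts at "unknown" and only ever becomes such a low), so
-- Python's d[k] never raises and getD with an arbitrary default 0 is exact here.
/-- The body of A's loop on the normalized token: the two reassignments, the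
rank-membership default, and the strict-max comparison, verbatim. -/
def mcStep (best t : String) : String :=
  let low := if t == "medium" then "probable" else t
  let low := if low == "high" || low == "strong" || low == "pass" then "confirmed" else low
  let low := if mcRank.contains low then low else "hypothesis"
  if mcRank.getD low 0 > mcRank.getD best 0 then low else best

def merge_conf (values : List String) : String :=
  values.foldl (fun best v => mcStep best (mcNorm v)) "unknown"

-- ===== PORT B =====
def merge_conf_alt (values : List String) : String :=
  let toks := values.map mcNorm
  if toks.any (fun t => t == "confirmed" || t == "high" || t == "strong" || t == "pass") then
    "confirmed"
  else if toks.any (fun t => t == "probable" || t == "medium") then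
    "probable"
  else if toks.any (fun t => t != "unknown") then
    "hypothesis"
  else
    "unknown"

-- ===== PRECONDITION & SPEC =====
def Spec_merge_conf (values : List String) (out : String) : Prop := out = merge_conf_alt values
instance (values : List String) (out : String) : Decidable (Spec_merge_conf values out) := by unfold Spec_merge_conf; infer_instance

-- ===== CLAIM (what is proved, stated in full; the proofs are below) =====
def Claim_equal_merge_conf : Prop := ∀ (values : List String), Dom_merge_conf values → Spec_merge_conf values (merge_conf values)

-- ===== LEMMAS AND PROOFS =====

-- B's three membership predicates, on a normalized token.
def mcP3 (t : String) : Bool := t == "confirmed" || t == "high" || t == "strong" || t == "pass"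
def mcP2 (t : String) : Bool := t == "probable" || t == "medium"
def mcP1 (t : String) : Bool := t != "unknown"

/-- The rank A effectively assigns to a normalized token. -/
def mcRk (t : String) : Int :=
  if mcP3 t then 3 else if mcP2 t then 2 else if mcP1 t then 1 else 0

/-- The canonical name of a rank 0–3 ("unknown" off-range; never used off-range). -/
def mcNm (r : Int) : String :=
  if r = 1 then "hypothesis" else if r = 2 then "probable" else
  if r = 3 then "confirmed" else "unknown"

lemma mcRank_mk : mcRank = PySem.Dict.mk
    [("unknown", 0), ("hypothesis", 1), ("probable", 2), ("confirmed", 3)] := by decide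

lemma mcRk_cases (t : String) :
    (mcP3 t = true ∧ mcRk t = 3) ∨
    (mcP3 t = false ∧ mcP2 t = true ∧ mcRk t = 2) ∨
    (mcP3 t = false ∧ mcP2 t = false ∧ mcP1 t = true ∧ mcRk t = 1) ∨
    (mcP3 t = false ∧ mcP2 t = false ∧ mcP1 t = false ∧ mcRk t = 0) := by
  unfold mcRk
  by_cases h3 : mcP3 t = true
  · simp [h3]
  · by_cases h2 : mcP2 t = true
    · simp [h3, h2]
    · by_cases h1 : mcP1 t = true
      · simp [h3, h2, h1]
      · simp [h3, h2, h1]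

lemma mcRk_range (t : String) : mcRk t = 0 ∨ mcRk t = 1 ∨ mcRk t = 2 ∨ mcRk t = 3 := by
  rcases mcRk_cases t with ⟨_, h⟩ | ⟨_, _, h⟩ | ⟨_, _, _, h⟩ | ⟨_, _, _, h⟩ <;> simp [h]

/-- One step of A's loop, starting from a canonical best name, equals the canonical
name of the max of the old rank and the token's rank. -/
lemma mc_step (t : String) (r : Int) (hr : r = 0 ∨ r = 1 ∨ r = 2 ∨ r = 3) :
    mcStep (mcNm r) t = mcNm (max r (mcRk t)) := by
  unfold mcStep
  by_cases h0 : t = "unknown"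
  · subst h0; rcases hr with h | h | h | h <;> subst h <;> decide
  by_cases h1 : t = "hypothesis"
  · subst h1; rcases hr with h | h | h | h <;> subst h <;> decide
  by_cases h2 : t = "probable"
  · subst h2; rcases hr with h | h | h | h <;> subst h <;> decide
  by_cases h3 : t = "confirmed"
  · subst h3; rcases hr with h | h | h | h <;> subst h <;> decide
  by_cases h4 : t = "medium"
  · subst h4; rcases hr with h | h | h | h <;> subst h <;> decide
  by_cases h5 : t = "high"
  · subst h5; rcases hr with h | h | h | h <;> subst h <;> decide
  by_cases h6 : t = "strong"
  · subst h6; rcases hr with h | h | h | h <;> subst h <;> decide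
  by_cases h7 : t = "pass"
  · subst h7; rcases hr with h | h | h | h <;> subst h <;> decide
  · -- generic token: not any of the eight special strings; rank 1
    have hch : (if (if t == "medium" then "probable" else t) == "high" ||
          (if t == "medium" then "probable" else t) == "strong" ||
          (if t == "medium" then "probable" else t) == "pass"
        then "confirmed" else (if t == "medium" then "probable" else t)) = t := by
      simp [h4, h5, h6, h7]
    have hc : mcRank.contains t = false := by
      simp [mcRank_mk, PySem.Dict.contains_mk, Ne.symm h0, Ne.symm h1, Ne.symm h2, Ne.symm h3]
    have hrk : mcRk t = 1 := by
      have p3 : mcP3 t = false := by simp [mcP3, h3, h5, h6, h7]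
      have p2 : mcP2 t = false := by simp [mcP2, h2, h4]
      have p1 : mcP1 t = true := by simp [mcP1, h0]
      simp [mcRk, p3, p2, p1]
    show (if mcRank.getD (if mcRank.contains (if (if t == "medium" then "probable" else t) == "high" ||
            (if t == "medium" then "probable" else t) == "strong" ||
            (if t == "medium" then "probable" else t) == "pass"
          then "confirmed" else (if t == "medium" then "probable" else t))
          then (if (if t == "medium" then "probable" else t) == "high" ||
            (if t == "medium" then "probable" else t) == "strong" ||
            (if t == "medium" then "probable" else t) == "pass"
          then "confirmed" else (if t == "medium" then "probable" else t))
          else "hypothesis") 0 > mcRank.getD (mcNm r) 0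
        then (if mcRank.contains (if (if t == "medium" then "probable" else t) == "high" ||
            (if t == "medium" then "probable" else t) == "strong" ||
            (if t == "medium" then "probable" else t) == "pass"
          then "confirmed" else (if t == "medium" then "probable" else t))
          then (if (if t == "medium" then "probable" else t) == "high" ||
            (if t == "medium" then "probable" else t) == "strong" ||
            (if t == "medium" then "probable" else t) == "pass"
          then "confirmed" else (if t == "medium" then "probable" else t))
          else "hypothesis")
        else mcNm r) = mcNm (max r (mcRk t))
    rw [hch, hc, hrk]
    simp only [Bool.false_eq_true, if_false]
    rcases hr with h | h | h | h <;> subst h <;> decide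

/-- A's fold from a canonical name computes the canonical name of the max rank. -/
lemma mc_fold (toks : List String) (r : Int) (hr : r = 0 ∨ r = 1 ∨ r = 2 ∨ r = 3) :
    toks.foldl mcStep (mcNm r) = mcNm ((toks.map mcRk).foldl max r) := by
  induction toks generalizing r with
  | nil => rfl
  | cons t ts ih =>
    have hr' : max r (mcRk t) = 0 ∨ max r (mcRk t) = 1 ∨
        max r (mcRk t) = 2 ∨ max r (mcRk t) = 3 := by
      have := mcRk_range t; omega
    simp only [List.foldl_cons, List.map_cons]
    rw [mc_step t r hr, ih _ hr']

lemma mc_fold_max_mem (L : List Int) (r : Int) :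
    L.foldl max r = r ∨ L.foldl max r ∈ L := by
  induction L generalizing r with
  | nil => exact Or.inl rfl
  | cons a as ih =>
    simp only [List.foldl_cons]
    rcases ih (max r a) with h | h
    · rcases le_total a r with hle | hle
      · exact Or.inl (by rw [h, max_eq_left hle])
      · exact Or.inr (by rw [h, max_eq_right hle]; exact List.mem_cons_self)
    · exact Or.inr (List.mem_cons_of_mem _ h)

lemma mcP3_iff (t : String) : mcP3 t = true ↔ mcRk t = 3 := by
  unfold mcRk; split_ifs with h1 h2 h3 <;> simp_all

lemma mcP2_iff (t : String) : (mcP3 t = false ∧ mcP2 t = true) ↔ mcRk t = 2 := by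
  unfold mcRk; split_ifs with h1 h2 h3 <;> simp_all

lemma mcP1_iff (t : String) : mcP1 t = true ↔ mcRk t ≠ 0 := by
  unfold mcRk
  split_ifs with h1 h2 h3
  · have hne : t ≠ "unknown" := by
      simp only [mcP3, Bool.or_eq_true, beq_iff_eq] at h1
      rcases h1 with ((h | h) | h) | h <;> subst h <;> decide
    simp [mcP1, hne]
  · have hne : t ≠ "unknown" := by
      simp only [mcP2, Bool.or_eq_true, beq_iff_eq] at h2
      rcases h2 with h | h <;> subst h <;> decide
    simp [mcP1, hne]
  · simp [h3]
  · simp [h3]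

/-- B's staged membership tests compute the canonical name of the max rank. -/
lemma mc_alt_eq (values : List String) :
    merge_conf_alt values = mcNm (((values.map mcNorm).map mcRk).foldl max 0) := by
  unfold merge_conf_alt
  simp only [show (fun t => t == "confirmed" || t == "high" || t == "strong" || t == "pass") = mcP3 from rfl,
    show (fun t => t == "probable" || t == "medium") = mcP2 from rfl,
    show (fun t : String => t != "unknown") = mcP1 from rfl]
  set toks := values.map mcNorm with htoks
  set L := toks.map mcRk with hL
  set M := L.foldl max 0 with hM
  have hub : ∀ a ∈ L, a ≤ M := (PySem.List.le_foldl_max L 0).2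
  have hmem : M = 0 ∨ M ∈ L := mc_fold_max_mem L 0
  have hrange : M = 0 ∨ M = 1 ∨ M = 2 ∨ M = 3 := by
    rcases hmem with h | h
    · exact Or.inl h
    · rcases List.mem_map.mp h with ⟨t, _, ht⟩
      have := mcRk_range t; omega
  by_cases h3 : toks.any mcP3 = true
  · have h3' : (3 : Int) ∈ L := by
      rcases List.any_eq_true.mp h3 with ⟨t, ht, hpt⟩
      exact List.mem_map.mpr ⟨t, ht, (mcP3_iff t).mp hpt⟩
    have hM3 : M = 3 := by have := hub 3 h3'; omega
    simp [h3, hM3, mcNm]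
  · have h3' : (3 : Int) ∉ L := by
      intro hc
      rcases List.mem_map.mp hc with ⟨t, ht, hrt⟩
      exact h3 (List.any_eq_true.mpr ⟨t, ht, (mcP3_iff t).mpr hrt⟩)
    have hMne3 : M ≠ 3 := by
      intro he; rcases hmem with h | h
      · omega
      · exact h3' (he ▸ h)
    simp only [h3, Bool.false_eq_true, if_false]
    by_cases h2 : toks.any mcP2 = true
    · have h2' : (2 : Int) ∈ L := by
        rcases List.any_eq_true.mp h2 with ⟨t, ht, hpt⟩
        have hp3 : mcP3 t = false := by
          rcases Bool.eq_false_or_eq_true (mcP3 t) with h | h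
          · exact absurd (List.any_eq_true.mpr ⟨t, ht, h⟩) h3
          · exact h
        exact List.mem_map.mpr ⟨t, ht, (mcP2_iff t).mp ⟨hp3, hpt⟩⟩
      have hM2 : M = 2 := by have := hub 2 h2'; omega
      simp [h2, hM2, mcNm]
    · have h2' : (2 : Int) ∉ L := by
        intro hc
        rcases List.mem_map.mp hc with ⟨t, ht, hrt⟩
        exact h2 (List.any_eq_true.mpr ⟨t, ht, ((mcP2_iff t).mpr hrt).2⟩)
      have hMne2 : M ≠ 2 := by
        intro he; rcases hmem with h | h
        · omega
        · exact h2' (he ▸ h)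
      simp only [h2, Bool.false_eq_true, if_false]
      by_cases h1 : toks.any mcP1 = true
      · have hM1 : M = 1 := by
          rcases List.any_eq_true.mp h1 with ⟨t, ht, hpt⟩
          have hmemL : mcRk t ∈ L := List.mem_map.mpr ⟨t, ht, rfl⟩
          have hle := hub _ hmemL
          have hne0 := (mcP1_iff t).mp hpt
          have := mcRk_range t
          omega
        simp [h1, hM1, mcNm]
      · have hM0 : M = 0 := by
          rcases hmem with h | h
          · exact h
          · rcases List.mem_map.mp h with ⟨t, ht, hrt⟩
            by_contra hne
            exact h1 (List.any_eq_true.mpr ⟨t, ht, (mcP1_iff t).mpr (by omega)⟩)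
        simp [h1, hM0, mcNm]

-- ===== VERDICT (by name: the statement is the Claim_ definition above) =====
theorem merge_conf_spec : Claim_equal_merge_conf := by
  intro values _
  show merge_conf values = merge_conf_alt values
  unfold merge_conf
  rw [← List.foldl_map (f := mcNorm) (g := mcStep), mc_alt_eq]
  exact mc_fold (values.map mcNorm) 0 (Or.inl rfl)
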